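-- pv_equiv track=rewrite | github.com/Brave-peng/aiops-exp | aiops_bench/results/writer.py | faults_status_text
-- ===== SOURCE A (Python) =====
-- from typing import Any
--
-- def faults_status_text(faults: list[dict[str, Any]]) -> str:
--     """汇总故障注入状态。"""
--     if not faults:
--         return "未执行"
--     if all(fault.get("status") == "active" for fault in faults):
--         return "已生效"
--     if any(fault.get("status") == "failed" for fault in faults):
--         return "失败"
--     return "部分完成"
-- ===== SOURCE B (Python) =====
-- from typing import Any
--
-- _SEVERITY = {"active": 0, "failed": 2}
-- _LABELS = ("已生效", "部分完成", "失败")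
--
-- def faults_status_text(faults: list[dict[str, Any]]) -> str:
--     """汇总故障注入状态: rank each status by severity and reduce with max(), then index a label table."""
--     if not faults:
--         return "未执行"
--     worst = max(_SEVERITY.get(fault.get("status"), 1) for fault in faults)
--     return _LABELS[worst]
-- ===== Notes on version B (the rewrite author's own statement) =====
-- stated objective: alternative
-- what changed: Replaced A's staged all()/any() boolean scans and early-return chain with a severity encoding: each status is mapped to a rank (active=0, other=1, failed=2), the ranks are reduced with a single max(), and the label is read from a table indexed by the worst rank.
import Mathlib
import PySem

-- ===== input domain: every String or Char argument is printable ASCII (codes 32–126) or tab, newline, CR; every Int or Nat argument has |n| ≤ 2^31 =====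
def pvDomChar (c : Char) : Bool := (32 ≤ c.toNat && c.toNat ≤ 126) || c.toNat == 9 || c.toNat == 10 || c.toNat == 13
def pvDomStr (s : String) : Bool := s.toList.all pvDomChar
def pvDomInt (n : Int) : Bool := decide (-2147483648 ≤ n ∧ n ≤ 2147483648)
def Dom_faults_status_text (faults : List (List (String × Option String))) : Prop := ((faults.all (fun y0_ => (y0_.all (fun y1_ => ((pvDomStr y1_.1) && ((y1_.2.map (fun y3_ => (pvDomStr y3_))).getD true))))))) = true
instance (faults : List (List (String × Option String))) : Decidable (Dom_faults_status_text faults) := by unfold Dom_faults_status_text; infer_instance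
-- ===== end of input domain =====

-- B replaces A's staged all()/any() scans with a severity-rank encoding reduced by max() and a label table (alternative decomposition, same cost).

-- ===== PORT A =====
-- fault.get("status") is a dict lookup returning Option (Option String); "== 'active'" iff some (some "active")
def faults_status_text (faults : List (List (String × Option String))) : String :=
  if faults = [] then "未执行"
  else if faults.all (fun fault => (PySem.Dict.mk fault).get? "status" == some (some "active")) then "已生效"
  else if faults.any (fun fault => (PySem.Dict.mk fault).get? "status" == some (some "failed")) then "失败"
  else "部分完成"

-- ===== PORT B =====
-- _SEVERITY.get(status, 1): status is None or missing → 1, else table lookup with default 1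
def pvSeverity : PySem.Dict String Nat := PySem.Dict.mk [("active", 0), ("failed", 2)]
def pvLabels : List String := ["已生效", "部分完成", "失败"]

def pvRank (fault : List (String × Option String)) : Nat :=
  match (PySem.Dict.mk fault).get? "status" with
  | some (some s) => pvSeverity.getD s 1
  | _ => 1

def faults_status_text_alt (faults : List (List (String × Option String))) : String :=
  if faults = [] then "未执行"
  else
    match PySem.List.max? (faults.map pvRank) (fun x => x) with
    | some worst => pvLabels.getD worst ""   -- index always in range 0..2
    | none => ""                             -- unreachable: faults ≠ []

-- ===== PRECONDITION & SPEC =====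
def Spec_faults_status_text (faults : List (List (String × Option String))) (out : String) : Prop := out = faults_status_text_alt faults
instance (faults : List (List (String × Option String))) (out : String) : Decidable (Spec_faults_status_text faults out) := by unfold Spec_faults_status_text; infer_instance

-- ===== CLAIM (what is proved, stated in full; the proofs are below) =====
def Claim_equal_faults_status_text : Prop := ∀ (faults : List (List (String × Option String))), Dom_faults_status_text faults → Spec_faults_status_text faults (faults_status_text faults)

-- ===== LEMMAS AND PROOFS =====

theorem pvSeverity_getD (s : String) :
    pvSeverity.getD s 1 = if s = "active" then 0 else if s = "failed" then 2 else 1 := by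
  by_cases h1 : s = "active"
  · subst h1; decide
  · by_cases h2 : s = "failed"
    · subst h2; decide
    · simp only [pvSeverity, PySem.Dict.getD]
      rw [PySem.Dict.get?_mk_cons, PySem.Dict.get?_mk_cons]
      simp [h1, h2, Ne.symm h1, Ne.symm h2, PySem.Dict.get?]

theorem pvRank_le_two (f : List (String × Option String)) : pvRank f ≤ 2 := by
  unfold pvRank
  cases h : (PySem.Dict.mk f).get? "status" with
  | none => simp
  | some o =>
    cases o with
    | none => simp
    | some s =>
      show pvSeverity.getD s 1 ≤ 2
      rw [pvSeverity_getD]; split_ifs <;> omega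

theorem pvRank_eq_zero_iff (f : List (String × Option String)) :
    pvRank f = 0 ↔ (PySem.Dict.mk f).get? "status" = some (some "active") := by
  unfold pvRank
  cases h : (PySem.Dict.mk f).get? "status" with
  | none => simp
  | some o =>
    cases o with
    | none => simp
    | some s =>
      show pvSeverity.getD s 1 = 0 ↔ some (some s) = some (some "active")
      rw [pvSeverity_getD]; split_ifs <;> simp_all

theorem pvRank_eq_two_iff (f : List (String × Option String)) :
    pvRank f = 2 ↔ (PySem.Dict.mk f).get? "status" = some (some "failed") := by
  unfold pvRank
  cases h : (PySem.Dict.mk f).get? "status" with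
  | none => simp
  | some o =>
    cases o with
    | none => simp
    | some s =>
      show pvSeverity.getD s 1 = 2 ↔ some (some s) = some (some "failed")
      rw [pvSeverity_getD]; split_ifs <;> simp_all

-- characterization of the running max of ranks
theorem pvFold_le_two (l : List (List (String × Option String))) (a : Nat) (ha : a ≤ 2) :
    (l.map pvRank).foldl max a ≤ 2 := by
  induction l generalizing a with
  | nil => simpa
  | cons f t ih =>
    simp only [List.map_cons, List.foldl_cons]
    exact ih _ (by have := pvRank_le_two f; omega)

theorem pvFold_eq_zero_iff (l : List (List (String × Option String))) (a : Nat) :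
    (l.map pvRank).foldl max a = 0 ↔
      a = 0 ∧ l.all (fun f => (PySem.Dict.mk f).get? "status" == some (some "active")) = true := by
  induction l generalizing a with
  | nil => simp
  | cons f t ih =>
    simp only [List.map_cons, List.foldl_cons, List.all_cons, Bool.and_eq_true, beq_iff_eq]
    rw [ih]
    constructor
    · rintro ⟨h1, h2⟩
      have h3 : a = 0 ∧ pvRank f = 0 := by omega
      exact ⟨h3.1, (pvRank_eq_zero_iff f).mp h3.2, h2⟩
    · rintro ⟨h1, h2, h3⟩
      have := (pvRank_eq_zero_iff f).mpr h2
      exact ⟨by omega, h3⟩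

theorem pvFold_eq_two_iff (l : List (List (String × Option String))) (a : Nat) (ha : a ≤ 2) :
    (l.map pvRank).foldl max a = 2 ↔
      a = 2 ∨ l.any (fun f => (PySem.Dict.mk f).get? "status" == some (some "failed")) = true := by
  induction l generalizing a with
  | nil => simp
  | cons f t ih =>
    simp only [List.map_cons, List.foldl_cons, List.any_cons, Bool.or_eq_true, beq_iff_eq]
    rw [ih _ (by have := pvRank_le_two f; omega)]
    have hf := pvRank_le_two f
    constructor
    · rintro (h | h)
      · have : a = 2 ∨ pvRank f = 2 := by omega
        rcases this with h' | h'
        · exact Or.inl h'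
        · exact Or.inr (Or.inl ((pvRank_eq_two_iff f).mp h'))
      · exact Or.inr (Or.inr h)
    · rintro (h | h | h)
      · exact Or.inl (by omega)
      · have := (pvRank_eq_two_iff f).mpr h
        exact Or.inl (by omega)
      · exact Or.inr h

-- ===== VERDICT (by name: the statement is the Claim_ definition above) =====
theorem faults_status_text_spec : Claim_equal_faults_status_text := by
  intro faults _
  unfold Spec_faults_status_text faults_status_text faults_status_text_alt
  cases faults with
  | nil => simp
  | cons f t =>
    simp only [ite_false, List.map_cons, PySem.List.max?_id_cons, reduceCtorEq]
    set v := (t.map pvRank).foldl max (pvRank f) with hv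
    have hle : v ≤ 2 := pvFold_le_two t _ (pvRank_le_two f)
    have h0 : v = 0 ↔ _ := pvFold_eq_zero_iff t (pvRank f)
    have h2 : v = 2 ↔ _ := pvFold_eq_two_iff t (pvRank f) (pvRank_le_two f)
    by_cases hall : ((f :: t).all (fun fault => (PySem.Dict.mk fault).get? "status" == some (some "active"))) = true
    · have hv0 : v = 0 := by
        rw [h0]
        simp only [List.all_cons, Bool.and_eq_true, beq_iff_eq] at hall
        exact ⟨(pvRank_eq_zero_iff f).mpr hall.1, by simp [List.all_eq_true] at hall ⊢; exact hall.2⟩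
      simp [hall, hv0, pvLabels]
    · by_cases hany : ((f :: t).any (fun fault => (PySem.Dict.mk fault).get? "status" == some (some "failed"))) = true
      · have hv2 : v = 2 := by
          rw [h2]
          simp only [List.any_cons, Bool.or_eq_true, beq_iff_eq] at hany
          rcases hany with h | h
          · exact Or.inl ((pvRank_eq_two_iff f).mpr h)
          · exact Or.inr (by simpa using h)
        simp [hall, hany, hv2, pvLabels]
      · have hv1 : v = 1 := by
          have hne0 : v ≠ 0 := by
            intro hx
            obtain ⟨hf0, ht⟩ := h0.mp hx
            apply hall
            simp only [List.all_cons, Bool.and_eq_true, beq_iff_eq]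
            exact ⟨(pvRank_eq_zero_iff f).mp hf0, ht⟩
          have hne2 : v ≠ 2 := by
            intro hx
            rcases h2.mp hx with hf2 | ht
            · apply hany
              simp only [List.any_cons, Bool.or_eq_true, beq_iff_eq]
              exact Or.inl ((pvRank_eq_two_iff f).mp hf2)
            · apply hany
              simp only [List.any_cons, Bool.or_eq_true]
              exact Or.inr ht
          omega
        simp [hall, hany, hv1, pvLabels]
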